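-- pv_equiv track=rewrite | github.com/hydra-dynamix/erasmus | bundler.py | find_first_usage_lines
-- ===== SOURCE A (Python) =====
-- def find_first_usage_lines(
--     code_body_lines: list[str], imports: list[str], from_imports: list[str]
-- ) -> list[str]:
--     """
--     Order imports by first usage in the code body. Unused imports go at the end.
--     For from-imports, use the minimum line number of all imported symbols.
--     For plain imports, use the minimum line number of the module name.
--     Preserve original order for ties.
--     """
--     usage_map = {}
--     code_lines = code_body_lines
--     # For plain imports, look for 'module.' or 'module(' or 'module ' in code
--     for idx, imp in enumerate(imports):
--         parts = imp.split()
--         if len(parts) >= 2: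
--             module = parts[1].split(",")[0]
--             module = module.split("as")[0].strip()
--             first_line = float("inf")
--             for line_idx, line in enumerate(code_lines):
--                 if f"{module}." in line or f"{module}(" in line or f"{module} " in line:
--                     first_line = line_idx
--                     break
--             usage_map[(imp, idx)] = first_line
--     # For from-imports, look for all imported symbols, use the minimum line number
--     for idx, imp in enumerate(from_imports):
--         try:
--             left, right = imp.split("import", 1)
--             symbols = [s.strip() for s in right.split(",") if s.strip()]
--         except Exception:
--             symbols = []
--         first_line = float("inf")
--         for symbol in symbols:
--             for line_idx, line in enumerate(code_lines):
--                 if f"{symbol}(" in line or f"{symbol} " in line or f"{symbol}." in line: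
--                     if line_idx < first_line:
--                         first_line = line_idx
--                     break
--         usage_map[(imp, idx + 10000)] = (
--             first_line  # offset idx to preserve order between import/from
--         )
--     # Sort by first usage, then by original order
--     ordered = sorted(usage_map.items(), key=lambda x: (x[1], x[0][1]))
--     return [imp for (imp, _), _ in ordered]
-- ===== SOURCE B (Python) =====
-- def find_first_usage_lines(
--     code_body_lines: list[str], imports: list[str], from_imports: list[str]
-- ) -> list[str]:
--     """Line-major single pass: collect the searched-for names first, walk the
--     code body ONCE keeping only the still-unresolved names (stopping when none
--     are left), then stable-sort the import entries by their first usage line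
--     (unused = +inf), which preserves original order (plain imports before
--     from-imports) on ties."""
--     INF = float("inf")
--     entries = []  # (import statement, names whose first usage lines matter)
--     for imp in imports:
--         parts = imp.split()
--         if len(parts) >= 2:
--             module = parts[1].split(",")[0].split("as")[0].strip()
--             entries.append((imp, [module]))
--     for imp in from_imports:
--         pieces = imp.split("import", 1)
--         if len(pieces) == 2:
--             symbols = [s.strip() for s in pieces[1].split(",") if s.strip()]
--         else:
--             symbols = []
--         entries.append((imp, symbols))
--     # one pass over the code body: first usage line per distinct name
--     unresolved = list(dict.fromkeys(n for _, names in entries for n in names))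
--     first = {}
--     i = 0
--     for line in code_body_lines:
--         if not unresolved:
--             break
--         still = []
--         for n in unresolved:
--             if n + "." in line or n + "(" in line or n + " " in line:
--                 first[n] = i
--             else:
--                 still.append(n)
--         unresolved = still
--         i += 1
--     keyed = [
--         (imp, min((first[n] for n in names if n in first), default=INF))
--         for imp, names in entries
--     ]
--     keyed.sort(key=lambda t: t[1])
--     return [imp for imp, _ in keyed]
-- ===== Notes on version B (the rewrite author's own statement) =====
-- stated objective: faster
-- what changed: Replaces A's pattern-major search (each import/symbol rescans the code body from the top) and its (value, idx+10000-offset) dict-and-tuple sort by a line-major single pass that walks the code body once, checking only the still-unresolved deduplicated names per line and stopping when none remain, then one stable sort of the entry list by first-usage line (unused = inf), which preserves original order (plain before from-imports) on ties without any index offset.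
import Mathlib
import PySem

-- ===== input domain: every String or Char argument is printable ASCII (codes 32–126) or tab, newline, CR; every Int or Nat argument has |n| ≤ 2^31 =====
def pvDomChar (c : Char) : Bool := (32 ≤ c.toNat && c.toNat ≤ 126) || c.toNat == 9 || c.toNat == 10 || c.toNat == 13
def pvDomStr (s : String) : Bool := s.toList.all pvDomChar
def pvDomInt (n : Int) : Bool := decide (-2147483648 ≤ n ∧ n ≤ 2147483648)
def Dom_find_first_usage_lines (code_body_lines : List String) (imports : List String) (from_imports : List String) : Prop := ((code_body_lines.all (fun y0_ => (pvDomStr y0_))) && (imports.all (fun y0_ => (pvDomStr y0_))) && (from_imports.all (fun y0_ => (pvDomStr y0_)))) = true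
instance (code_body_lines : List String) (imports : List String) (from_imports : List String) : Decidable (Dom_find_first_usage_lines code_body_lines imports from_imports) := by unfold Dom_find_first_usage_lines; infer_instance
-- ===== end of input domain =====

-- B walks the code body once line-major (recording each name's first usage) and stable-sorts the
-- entries by that line, instead of A's per-pattern rescans and (value, idx+10000) dict/tuple sort.


-- ===== PORT A =====
-- f"{module}." in line or f"{module}(" in line or f"{module} " in line
def pvA_hit (m line : String) : Bool :=
  PySem.Str.isIn (m ++ ".") line || PySem.Str.isIn (m ++ "(") line || PySem.Str.isIn (m ++ " ") line

-- 'first_line = inf; for line_idx, line in enumerate(code_lines): if <hit>: first_line = line_idx; break'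
-- (float('inf') is represented as ⊤ : WithTop Nat; the loop index is the Nat argument)
def pvA_scan (m : String) : List String → Nat → WithTop Nat
  | [], _ => ⊤
  | l :: ls, i => if pvA_hit m l then (i : WithTop Nat) else pvA_scan m ls (i + 1)

-- first for-loop of A (plain imports)
def pvA_plain (code_lines : List String) (imports : List String)
    (d : PySem.Dict (String × Int) (WithTop Nat)) : PySem.Dict (String × Int) (WithTop Nat) :=
  (PySem.List.enumerate imports).foldl (fun d p =>
    let parts := PySem.Str.split₀ p.2
    if 2 ≤ parts.length then
      let m0 := ((PySem.Str.split? (parts.getD 1 "") ",").getD []).getD 0 ""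
      let module := PySem.Str.strip (((PySem.Str.split? m0 "as").getD []).getD 0 "")
      d.insert (p.2, p.1) (pvA_scan module code_lines 0)
    else d) d

-- 'left, right = imp.split("import", 1)' succeeds iff the split has 2 pieces, else except → []
def pvA_symbols (imp : String) : List String :=
  let pieces := (PySem.Str.splitMax? imp "import" 1).getD []
  if pieces.length = 2 then
    (((PySem.Str.split? (pieces.getD 1 "") ",").getD []).map PySem.Str.strip).filter (fun s => s ≠ "")
  else []

-- second for-loop of A (from-imports); 'if line_idx < first_line: first_line = line_idx' after a
-- per-symbol scan that breaks at the first hit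
def pvA_from (code_lines : List String) (from_imports : List String)
    (d : PySem.Dict (String × Int) (WithTop Nat)) : PySem.Dict (String × Int) (WithTop Nat) :=
  (PySem.List.enumerate from_imports).foldl (fun d p =>
    let symbols := pvA_symbols p.2
    let first_line := symbols.foldl (fun fl s =>
      let r := pvA_scan s code_lines 0
      if r < fl then r else fl) (⊤ : WithTop Nat)
    d.insert (p.2, p.1 + 10000) first_line) d

def find_first_usage_lines (code_body_lines : List String) (imports : List String) (from_imports : List String) : List String :=
  let usage_map := pvA_from code_body_lines from_imports (pvA_plain code_body_lines imports PySem.Dict.empty)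
  let ordered := PySem.List.sorted2 usage_map.items (fun x => x.2) (fun x => x.1.2) false
  ordered.map (fun x => x.1.1)

-- ===== PORT B =====
def pvB_hit (n line : String) : Bool :=
  PySem.Str.isIn (n ++ ".") line || PySem.Str.isIn (n ++ "(") line || PySem.Str.isIn (n ++ " ") line

-- the two entry-building loops of Source B: (import statement, names to look for)
def pvB_entries (imports : List String) (from_imports : List String) : List (String × List String) :=
  let e1 := imports.foldl (fun acc imp =>
    let parts := PySem.Str.split₀ imp
    if 2 ≤ parts.length then
      let m0 := ((PySem.Str.split? (parts.getD 1 "") ",").getD []).getD 0 ""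
      let module := PySem.Str.strip (((PySem.Str.split? m0 "as").getD []).getD 0 "")
      acc ++ [(imp, [module])]
    else acc) []
  from_imports.foldl (fun acc imp =>
    let pieces := (PySem.Str.splitMax? imp "import" 1).getD []
    let symbols := if pieces.length = 2 then
        (((PySem.Str.split? (pieces.getD 1 "") ",").getD []).map PySem.Str.strip).filter (fun s => s ≠ "")
      else []
    acc ++ [(imp, symbols)]) e1

-- Source B's single pass over the code body, keeping only the still-unresolved names
-- ('for line: if not unresolved: break; for n in unresolved: ...')
def pvB_pass : List String → Nat → PySem.Dict String Nat → List String → PySem.Dict String Nat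
  | [], _, first, _ => first
  | l :: ls, i, first, unresolved =>
      if unresolved.isEmpty then first
      else
        let st := unresolved.foldl (fun (st : PySem.Dict String Nat × List String) n =>
          if pvB_hit n l then (st.1.insert n i, st.2) else (st.1, st.2 ++ [n])) (first, [])
        pvB_pass ls (i + 1) st.1 st.2

def find_first_usage_lines_alt (code_body_lines : List String) (imports : List String) (from_imports : List String) : List String :=
  let entries := pvB_entries imports from_imports
  -- unresolved = list(dict.fromkeys(n for _, names in entries for n in names))
  let unresolved := PySem.List.dedup (entries.flatMap (fun e => e.2))
  let first := pvB_pass code_body_lines 0 PySem.Dict.empty unresolved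
  -- keyed = [(imp, min((first[n] for n in names if n in first), default=INF)) ...]
  let keyed := entries.map (fun e =>
    (e.1, PySem.List.minD (e.2.filterMap (fun n => (first.get? n).map (fun i => (i : WithTop Nat))))
            (fun v => v) (⊤ : WithTop Nat)))
  let ordered := PySem.List.sorted keyed (fun t => t.2) false
  ordered.map (fun t => t.1)

-- ===== PRECONDITION & SPEC =====
-- Pre_ excludes inputs with more than 10000 plain imports: there A's '+ 10000' index offset no longer
-- separates plain-import dict keys from from-import keys, so its key collisions (an entry silently
-- overwritten) and its tie order (a from-import sorted before a later plain import) are accidents of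
-- the offset, which B does not reproduce.
def Pre_find_first_usage_lines (code_body_lines : List String) (imports : List String) (from_imports : List String) : Prop :=
  imports.length ≤ 10000
instance (code_body_lines : List String) (imports : List String) (from_imports : List String) : Decidable (Pre_find_first_usage_lines code_body_lines imports from_imports) := by unfold Pre_find_first_usage_lines; infer_instance

def pvWitness_find_first_usage_lines : List String × List String × List String :=
  (["x.run()", "y z"], ["import x", "import y as q"], ["from m import y, z"])

def Spec_find_first_usage_lines (code_body_lines : List String) (imports : List String) (from_imports : List String) (out : List String) : Prop := out = find_first_usage_lines_alt code_body_lines imports from_imports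
instance (code_body_lines : List String) (imports : List String) (from_imports : List String) (out : List String) : Decidable (Spec_find_first_usage_lines code_body_lines imports from_imports out) := by unfold Spec_find_first_usage_lines; infer_instance

-- ===== CLAIM (what is proved, stated in full; the proofs are below) =====
def Claim_equal_find_first_usage_lines : Prop := ∀ (code_body_lines : List String) (imports : List String) (from_imports : List String), Dom_find_first_usage_lines code_body_lines imports from_imports → Pre_find_first_usage_lines code_body_lines imports from_imports → Spec_find_first_usage_lines code_body_lines imports from_imports (find_first_usage_lines code_body_lines imports from_imports)


-- ===== LEMMAS AND PROOFS =====

-- proof-side abbreviations for the shared parsing expressions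
def pvMod (imp : String) : String :=
  PySem.Str.strip (((PySem.Str.split? (((PySem.Str.split? ((PySem.Str.split₀ imp).getD 1 "") ",").getD []).getD 0 "") "as").getD []).getD 0 "")
def pvCond (imp : String) : Bool := decide (2 ≤ (PySem.Str.split₀ imp).length)
def pvAval (lines : List String) (ss : List String) : WithTop Nat :=
  ss.foldl (fun fl s =>
    let r := pvA_scan s lines 0
    if r < fl then r else fl) (⊤ : WithTop Nat)
def pvItemsA (lines imports from_imports : List String) : List ((String × Int) × WithTop Nat) :=
  ((PySem.List.enumerate imports).filter (fun p => pvCond p.2)).map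
      (fun p => ((p.2, p.1), pvA_scan (pvMod p.2) lines 0))
  ++ (PySem.List.enumerate from_imports).map
      (fun p => ((p.2, p.1 + 10000), pvAval lines (pvA_symbols p.2)))

-- ---------- generic stable-sort lemmas ----------

theorem pv_insertBy_congr {α : Type} (f g : α → α → Bool) (x : α) (l : List α)
    (h : ∀ y ∈ l, f x y = g x y) : PySem.List.insertBy f x l = PySem.List.insertBy g x l := by
  induction l with
  | nil => rfl
  | cons y ys ih =>
      simp only [PySem.List.insertBy] at *
      rw [h y (by simp)]
      by_cases hb : g x y = true <;> simp [hb, ih (fun z hz => h z (by simp [hz]))]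

-- a tuple sort key whose second component is strictly increasing along the list is a plain stable
-- sort by the first component
theorem pv_sorted2_eq_sorted {α κ : Type} [LT κ] [DecidableLT κ]
    (xs : List α) (k1 : α → κ) (k2 : α → Int) (h : xs.Pairwise (fun a b => k2 a < k2 b)) :
    PySem.List.sorted2 xs k1 k2 false = PySem.List.sorted xs k1 false := by
  unfold PySem.List.sorted2 PySem.List.sorted
  simp only [if_neg (by decide : ¬ (false = true))]
  suffices H : ∀ acc : List α, (∀ y ∈ acc, ∀ x ∈ xs, k2 y < k2 x) →
      xs.foldl (fun acc x => PySem.List.insertBy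
        (fun a b => decide (k1 a < k1 b) || (!decide (k1 b < k1 a) && decide (k2 a < k2 b))) x acc) acc
      = xs.foldl (fun acc x => PySem.List.insertBy (fun a b => decide (k1 a < k1 b)) x acc) acc by
    exact H [] (by simp)
  induction xs with
  | nil => intro acc _; rfl
  | cons x xs ih =>
      intro acc hacc
      rw [List.pairwise_cons] at h
      simp only [List.foldl_cons]
      rw [pv_insertBy_congr _ (fun a b => decide (k1 a < k1 b)) x acc (fun y hy => by
        have h2 : ¬ (k2 x < k2 y) := not_lt_of_gt (hacc y hy x (by simp))
        simp [h2])]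
      exact ih h.2 _ (fun y hy x' hx' => by
        rcases (PySem.List.mem_insertBy _ x y acc).1 hy with h1 | h1
        · exact h1 ▸ h.1 x' hx'
        · exact hacc y h1 x' (by simp [hx']))

theorem pv_map_insertBy {α β κ : Type} [LT κ] [DecidableLT κ] (g : α → β) (key : β → κ) (x : α) (l : List α) :
    PySem.List.insertBy (fun a b => decide (key a < key b)) (g x) (l.map g)
      = (PySem.List.insertBy (fun a b => decide (key (g a) < key (g b))) x l).map g := by
  induction l with
  | nil => rfl
  | cons y ys ih =>
      simp only [List.map_cons, PySem.List.insertBy]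
      by_cases hb : key (g x) < key (g y) <;> simp [hb, ih]

theorem pv_sorted_map {α β κ : Type} [LT κ] [DecidableLT κ] (g : α → β) (key : β → κ) (l : List α) :
    PySem.List.sorted (l.map g) key false = (PySem.List.sorted l (fun a => key (g a)) false).map g := by
  unfold PySem.List.sorted
  simp only [if_neg (by decide : ¬ (false = true))]
  suffices H : ∀ acc : List α, (l.map g).foldl (fun acc x => PySem.List.insertBy (fun a b => decide (key a < key b)) x acc) (acc.map g)
      = (l.foldl (fun acc x => PySem.List.insertBy (fun a b => decide (key (g a) < key (g b))) x acc) acc).map g by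
    simpa using H []
  induction l with
  | nil => intro acc; rfl
  | cons x xs ih =>
      intro acc
      simp only [List.map_cons, List.foldl_cons]
      rw [pv_map_insertBy g key x acc, ih]

-- ---------- A's dict as an explicit items list ----------

theorem pv_plain_items (lines imports : List String) :
    (pvA_plain lines imports PySem.Dict.empty).items
      = ((PySem.List.enumerate imports).filter (fun p => pvCond p.2)).map
          (fun p => ((p.2, p.1), pvA_scan (pvMod p.2) lines 0)) := by
  have hA : pvA_plain lines imports PySem.Dict.empty
      = (PySem.List.enumerate imports).foldl (fun d p =>
          if 2 ≤ (PySem.Str.split₀ p.2).length then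
            d.insert (p.2, p.1) (pvA_scan (pvMod p.2) lines 0)
          else d) PySem.Dict.empty := rfl
  rw [hA]
  rw [PySem.List.foldl_ite_eq_foldl_filter
        (p := fun p : Int × String => 2 ≤ (PySem.Str.split₀ p.2).length)
        (f := fun (d : PySem.Dict (String × Int) (WithTop Nat)) p =>
          d.insert (p.2, p.1) (pvA_scan (pvMod p.2) lines 0))]
  have hnd : (((PySem.List.enumerate imports).filter
      (fun p => decide (2 ≤ (PySem.Str.split₀ p.2).length))).map
        (fun p : Int × String => (p.2, p.1))).Nodup := by
    have h1 : ((PySem.List.enumerate imports).filter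
        (fun p => decide (2 ≤ (PySem.Str.split₀ p.2).length))).Pairwise (fun p q => p.1 < q.1) :=
      (PySem.List.pairwise_lt_enumerate imports 0).sublist List.filter_sublist
    show List.Pairwise _ _
    rw [List.pairwise_map]
    exact h1.imp (fun hlt => by simp_all [Prod.ext_iff]; omega)
  refine (PySem.Dict.items_foldl_insert_fresh _
      (fun p : Int × String => (p.2, p.1))
      (fun p => pvA_scan (pvMod p.2) lines 0) PySem.Dict.empty
      (fun a _ => PySem.Dict.contains_empty _) hnd).trans ?_
  rfl

theorem pv_items_A (lines imports from_imports : List String)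
    (hpre : imports.length ≤ 10000) :
    (pvA_from lines from_imports (pvA_plain lines imports PySem.Dict.empty)).items
      = pvItemsA lines imports from_imports := by
  have hF : pvA_from lines from_imports (pvA_plain lines imports PySem.Dict.empty)
      = (PySem.List.enumerate from_imports).foldl (fun d p =>
          d.insert (p.2, p.1 + 10000) (pvAval lines (pvA_symbols p.2)))
        (pvA_plain lines imports PySem.Dict.empty) := rfl
  rw [hF]
  unfold pvItemsA
  have hplain := pv_plain_items lines imports
  have hfresh : ∀ a ∈ PySem.List.enumerate from_imports,
      (pvA_plain lines imports PySem.Dict.empty).contains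
        ((fun p : Int × String => (p.2, p.1 + 10000)) a) = false := by
    intro a ha
    rw [PySem.Dict.contains_eq_decide_mem_keys]
    have hkeys : (pvA_plain lines imports PySem.Dict.empty).keys
        = (((PySem.List.enumerate imports).filter (fun p => pvCond p.2)).map
            (fun p => ((p.2, p.1), pvA_scan (pvMod p.2) lines 0))).map (fun x => x.1) := by
      simp only [PySem.Dict.keys, hplain]
    rw [hkeys, List.map_map]
    simp only [decide_eq_false_iff_not, List.mem_map, Function.comp_apply]
    rintro ⟨x, hx, hxeq⟩
    rcases (PySem.List.mem_enumerate_iff _ _ _).1 (List.mem_of_mem_filter hx) with ⟨k, hk, rfl⟩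
    rcases (PySem.List.mem_enumerate_iff _ _ _).1 ha with ⟨j, hj, rfl⟩
    have h2 : ((0 : Int) + k) = (0 : Int) + j + 10000 := congrArg Prod.snd hxeq
    omega
  have hnd : ((PySem.List.enumerate from_imports).map
      (fun p : Int × String => (p.2, p.1 + 10000))).Nodup := by
    show List.Pairwise _ _
    rw [List.pairwise_map]
    exact (PySem.List.pairwise_lt_enumerate from_imports 0).imp
      (fun hlt => by simp_all [Prod.ext_iff]; omega)
  refine (PySem.Dict.items_foldl_insert_fresh _
      (fun p : Int × String => (p.2, p.1 + 10000))
      (fun p => pvAval lines (pvA_symbols p.2))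
      (pvA_plain lines imports PySem.Dict.empty) hfresh hnd).trans ?_
  rw [hplain]

-- ---------- B's entries as an explicit list ----------

theorem pv_entries_eq (imports from_imports : List String) :
    pvB_entries imports from_imports
      = (imports.filter pvCond).map (fun imp => (imp, [pvMod imp]))
        ++ from_imports.map (fun imp => (imp, pvA_symbols imp)) := by
  have hB : pvB_entries imports from_imports
      = from_imports.foldl (fun acc imp => acc ++ [(imp, pvA_symbols imp)])
          (imports.foldl (fun acc imp =>
            if 2 ≤ (PySem.Str.split₀ imp).length then acc ++ [(imp, [pvMod imp])] else acc) []) := rfl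
  rw [hB]
  rw [PySem.List.foldl_append_ite
        (p := fun imp => 2 ≤ (PySem.Str.split₀ imp).length)
        (f := fun imp => (imp, [pvMod imp])),
      PySem.List.foldl_append_singleton_eq_map
        (f := fun imp => (imp, pvA_symbols imp))]
  rfl

-- ---------- scan = findIdx? ----------

theorem pv_scan_eq (m : String) (ls : List String) (i : Nat) :
    pvA_scan m ls i = ((ls.findIdx? (pvB_hit m)).map
      (fun k => ((i + k : Nat) : WithTop Nat))).getD ⊤ := by
  induction ls generalizing i with
  | nil => rfl
  | cons l ls ih =>
      rw [pvA_scan, List.findIdx?_cons]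
      have hb : pvB_hit m l = pvA_hit m l := rfl
      rw [hb]
      cases hc : pvA_hit m l with
      | true => simp
      | false =>
          simp only [Bool.false_eq_true, if_false, ih (i + 1), Option.map_map]
          cases ls.findIdx? (pvB_hit m) with
          | none => rfl
          | some k =>
              simp only [Option.map_some, Option.getD_some, Function.comp_apply]
              congr 1
              omega

-- ---------- B's first-usage dict ----------

theorem pv_inner_get? (l : String) (i : Nat) (ns : List String) (d : PySem.Dict String Nat) (n : String) :
    (ns.foldl (fun d n => if pvB_hit n l then d.insert n i else d) d).get? n
      = if n ∈ ns ∧ pvB_hit n l = true then some i else d.get? n := by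
  induction ns generalizing d with
  | nil => simp
  | cons m ns ih =>
      simp only [List.foldl_cons, ih]
      by_cases hm : pvB_hit m l = true
      · simp only [if_pos hm]
        by_cases hnm : n = m
        · subst hnm
          by_cases h1 : n ∈ ns <;> simp [h1, hm, PySem.Dict.get?_insert_self]
        · rw [PySem.Dict.get?_insert_of_ne _ _ hnm]
          simp [hnm]
      · simp only [if_neg hm]
        by_cases hnm : n = m
        · subst hnm
          simp [hm]
        · simp [hnm]

theorem pv_still (l : String) (unresolved : List String) :
    unresolved.foldl (fun acc n => if pvB_hit n l then acc else acc ++ [n]) []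
      = unresolved.filter (fun n => !pvB_hit n l) := by
  rw [PySem.List.foldl_congr_mem _ _
        (fun acc n => if (!pvB_hit n l) = true then acc ++ [n] else acc) _
        (fun acc n _ => by cases h : pvB_hit n l <;> simp [h])]
  rw [PySem.List.foldl_append_if_eq_filter]
  rfl

theorem pv_pass_get? (ls : List String) : ∀ (i : Nat) (first : PySem.Dict String Nat)
    (unresolved : List String) (n : String),
    (pvB_pass ls i first unresolved).get? n
      = match ls.findIdx? (pvB_hit n) with
        | some k => if n ∈ unresolved then some (i + k) else first.get? n
        | none => first.get? n := by
  induction ls with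
  | nil =>
      intro i first unresolved n
      simp [pvB_pass]
  | cons l ls ih =>
      intro i first unresolved n
      rw [pvB_pass]
      by_cases hemp : unresolved.isEmpty
      · rw [if_pos hemp]
        rw [List.isEmpty_iff.1 hemp]
        cases hfi : ls.findIdx? (pvB_hit n) <;> cases h : pvB_hit n l <;>
          simp [List.findIdx?_cons, h, hfi]
      · rw [if_neg hemp]
        have hpair : unresolved.foldl (fun (st : PySem.Dict String Nat × List String) n =>
              if pvB_hit n l then (st.1.insert n i, st.2) else (st.1, st.2 ++ [n])) (first, [])
            = (unresolved.foldl (fun d n => if pvB_hit n l then d.insert n i else d) first,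
               unresolved.filter (fun n => !pvB_hit n l)) := by
          rw [PySem.List.foldl_congr_mem _ _
                (fun (st : PySem.Dict String Nat × List String) n =>
                  ((if pvB_hit n l then st.1.insert n i else st.1),
                   (if pvB_hit n l then st.2 else st.2 ++ [n]))) _
                (fun st n _ => by cases h : pvB_hit n l <;> simp [h])]
          refine Eq.trans (PySem.List.foldl_prod_mk
                (fun (d : PySem.Dict String Nat) n => if pvB_hit n l then d.insert n i else d)
                (fun (acc : List String) n => if pvB_hit n l then acc else acc ++ [n])
                unresolved first []) ?_
          rw [pv_still]
        rw [hpair, ih, pv_inner_get?, List.findIdx?_cons]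
        by_cases hb : pvB_hit n l
        · simp only [hb, and_true]
          have hnf : n ∉ unresolved.filter (fun n => !pvB_hit n l) := by
            simp [List.mem_filter, hb]
          cases hfi : ls.findIdx? (pvB_hit n) <;>
            by_cases h1 : n ∈ unresolved <;> simp_all
        · simp only [hb, Bool.false_eq_true, and_false, if_false]
          have hnf : n ∈ unresolved.filter (fun n => !pvB_hit n l) ↔ n ∈ unresolved := by
            simp [List.mem_filter, hb]
          cases hfi : ls.findIdx? (pvB_hit n) with
          | none => simp_all
          | some k =>
              have harith : i + 1 + k = i + (k + 1) := by omega
              by_cases h1 : n ∈ unresolved <;> simp_all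

theorem pv_first_get? (entries : List (String × List String)) (ls : List String) (n : String) :
    (pvB_pass ls 0 PySem.Dict.empty
        (PySem.List.dedup (entries.flatMap (fun e => e.2)))).get? n
      = match ls.findIdx? (pvB_hit n) with
        | some k => if n ∈ entries.flatMap (fun e => e.2) then some k else none
        | none => none := by
  rw [pv_pass_get?]
  have hm : n ∈ PySem.List.dedup (entries.flatMap (fun e => e.2))
      ↔ n ∈ entries.flatMap (fun e => e.2) := PySem.Set.mem_ofList _ _
  have he : (PySem.Dict.empty : PySem.Dict String Nat).get? n = none := rfl
  cases ls.findIdx? (pvB_hit n) <;>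
    by_cases hmem : n ∈ entries.flatMap (fun e => e.2) <;> simp [hmem, he]

-- ---------- per-entry values ----------

def pvToOpt (w : WithTop Nat) : Option (WithTop Nat) := if w = ⊤ then none else some w

-- dropping the unused entries (value ⊤ = inf) does not change the running minimum
theorem pv_fold_filter (vs : List (WithTop Nat)) : ∀ a : WithTop Nat,
    vs.foldl min a = (vs.filterMap pvToOpt).foldl min a := by
  induction vs with
  | nil => intro a; rfl
  | cons v vs ih =>
      intro a
      by_cases hv : v = ⊤
      · subst hv
        simp only [List.foldl_cons, List.filterMap_cons, pvToOpt,
          min_eq_left (le_top (a := a))]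
        exact ih a
      · simp only [List.foldl_cons, List.filterMap_cons, pvToOpt, if_neg hv]
        exact ih (min a v)

theorem pv_minD_eq (vs : List (WithTop Nat)) :
    PySem.List.minD (vs.filterMap pvToOpt) (fun v => v) (⊤ : WithTop Nat) = vs.foldl min ⊤ := by
  rw [pv_fold_filter vs ⊤]
  cases h : vs.filterMap pvToOpt with
  | nil => simp [PySem.List.minD_nil]
  | cons x t =>
      rw [PySem.List.minD_id_cons, List.foldl_cons, min_eq_right (le_top (a := x))]

-- value of first[n] as an option, versus A's scan
theorem pv_get?_map (entries : List (String × List String)) (lines : List String) (n : String)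
    (hn : n ∈ entries.flatMap (fun e => e.2)) :
    ((pvB_pass lines 0 PySem.Dict.empty (PySem.List.dedup (entries.flatMap (fun e => e.2)))).get? n).map (fun i => (i : WithTop Nat))
      = pvToOpt (pvA_scan n lines 0) := by
  rw [pv_first_get?, pv_scan_eq]
  cases h : lines.findIdx? (pvB_hit n) with
  | none => simp [pvToOpt]
  | some k => simp [hn, pvToOpt]

-- B's min(first[n] for n in names, default=inf) equals A's running minimum of scans
theorem pv_value_eq (entries : List (String × List String)) (lines ss : List String)
    (h : ∀ s ∈ ss, s ∈ entries.flatMap (fun e => e.2)) :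
    PySem.List.minD (ss.filterMap (fun n =>
        ((pvB_pass lines 0 PySem.Dict.empty (PySem.List.dedup (entries.flatMap (fun e => e.2)))).get? n).map (fun i => (i : WithTop Nat))))
      (fun v => v) (⊤ : WithTop Nat) = pvAval lines ss := by
  have h1 : ss.filterMap (fun n =>
        ((pvB_pass lines 0 PySem.Dict.empty (PySem.List.dedup (entries.flatMap (fun e => e.2)))).get? n).map (fun i => (i : WithTop Nat)))
      = (ss.map (fun s => pvA_scan s lines 0)).filterMap pvToOpt := by
    rw [List.filterMap_map]
    exact List.filterMap_congr (fun s hs => pv_get?_map entries lines s (h s hs))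
  rw [h1, pv_minD_eq, List.foldl_map]
  have hv : pvAval lines ss
      = ss.foldl (fun fl s => if pvA_scan s lines 0 < fl then pvA_scan s lines 0 else fl) ⊤ := rfl
  rw [hv]
  refine PySem.List.foldl_congr_mem _ _ _ _ (fun acc x _ => ?_)
  by_cases hr : pvA_scan x lines 0 < acc
  · rw [if_pos hr, min_eq_right (le_of_lt hr)]
  · rw [if_neg hr, min_eq_left (not_lt.1 hr)]

theorem pv_aval_singleton (lines : List String) (m : String) :
    pvAval lines [m] = pvA_scan m lines 0 := by
  have hv : pvAval lines [m]
      = if pvA_scan m lines 0 < ⊤ then pvA_scan m lines 0 else ⊤ := rfl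
  rw [hv]
  by_cases h : pvA_scan m lines 0 = ⊤
  · simp [h]
  · simp [lt_top_iff_ne_top.2 h]

-- enumerate bookkeeping
theorem pv_enum_filter_map {β : Type} (h : String → β) (c : String → Bool) (xs : List String) :
    ∀ s : Int, (((PySem.List.enumerate xs s).filter (fun p => c p.2)).map (fun p => h p.2))
      = (xs.filter c).map h := by
  induction xs with
  | nil => intro s; rfl
  | cons x xs ih =>
      intro s
      rw [PySem.List.enumerate_cons, List.filter_cons, List.filter_cons]
      by_cases hc : c x
      · simp [hc, ih (s + 1)]
      · simp [hc, ih (s + 1)]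

theorem pv_enum_map {β : Type} (h : String → β) (xs : List String) (s : Int) :
    ((PySem.List.enumerate xs s).map (fun p => h p.2)) = xs.map h := by
  have h1 : (fun p : Int × String => h p.2) = h ∘ (fun p : Int × String => p.2) := rfl
  rw [h1, ← List.map_map, PySem.List.map_snd_enumerate]

-- the sort key's second component is strictly increasing along A's items list
theorem pv_pairwise (lines imports from_imports : List String)
    (hpre : imports.length ≤ 10000) :
    (pvItemsA lines imports from_imports).Pairwise (fun a b => a.1.2 < b.1.2) := by
  unfold pvItemsA
  rw [List.pairwise_append]
  refine ⟨?_, ?_, ?_⟩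
  · rw [List.pairwise_map]
    exact ((PySem.List.pairwise_lt_enumerate imports 0).sublist List.filter_sublist).imp
      (fun hlt => by simpa using hlt)
  · rw [List.pairwise_map]
    exact (PySem.List.pairwise_lt_enumerate from_imports 0).imp
      (fun hlt => by simpa using hlt)
  · intro a ha b hb
    simp only [List.mem_map] at ha hb
    rcases ha with ⟨p, hp, rfl⟩
    rcases hb with ⟨q, hq, rfl⟩
    rcases (PySem.List.mem_enumerate_iff _ _ _).1 (List.mem_of_mem_filter hp) with ⟨k, hk, rfl⟩
    rcases (PySem.List.mem_enumerate_iff _ _ _).1 hq with ⟨j, hj, rfl⟩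
    simp only []
    omega

def pvG : ((String × Int) × WithTop Nat) → String × WithTop Nat := fun x => (x.1.1, x.2)

-- B's keyed list is A's items list with the index keys dropped
theorem pv_keyed_eq (lines imports from_imports : List String) :
    (pvB_entries imports from_imports).map (fun e =>
        (e.1, PySem.List.minD (e.2.filterMap (fun n =>
            ((pvB_pass lines 0 PySem.Dict.empty (PySem.List.dedup ((pvB_entries imports from_imports).flatMap (fun e => e.2)))).get? n).map
              (fun i => (i : WithTop Nat))))
          (fun v => v) (⊤ : WithTop Nat)))
      = (pvItemsA lines imports from_imports).map pvG := by
  have h1 : (pvB_entries imports from_imports).map (fun e =>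
        (e.1, PySem.List.minD (e.2.filterMap (fun n =>
            ((pvB_pass lines 0 PySem.Dict.empty (PySem.List.dedup ((pvB_entries imports from_imports).flatMap (fun e => e.2)))).get? n).map
              (fun i => (i : WithTop Nat))))
          (fun v => v) (⊤ : WithTop Nat)))
      = (pvB_entries imports from_imports).map (fun e => (e.1, pvAval lines e.2)) :=
    List.map_congr_left (fun e he => by
      rw [pv_value_eq _ lines e.2 (fun s hs => List.mem_flatMap.2 ⟨e, he, hs⟩)])
  rw [h1, pv_entries_eq, List.map_append, List.map_map]
  unfold pvItemsA
  rw [List.map_append, List.map_map, List.map_map, List.map_map]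
  congr 1
  · refine Eq.trans (List.map_congr_left (fun imp himp => ?_))
      (pv_enum_filter_map (h := fun imp => (imp, pvA_scan (pvMod imp) lines 0))
        (c := pvCond) imports 0).symm
    show (imp, pvAval lines [pvMod imp]) = (imp, pvA_scan (pvMod imp) lines 0)
    rw [pv_aval_singleton]
  · exact (pv_enum_map (h := fun imp => (imp, pvAval lines (pvA_symbols imp))) from_imports 0).symm

theorem pv_witness_ok :
    Dom_find_first_usage_lines pvWitness_find_first_usage_lines.1 pvWitness_find_first_usage_lines.2.1 pvWitness_find_first_usage_lines.2.2 ∧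
    Pre_find_first_usage_lines pvWitness_find_first_usage_lines.1 pvWitness_find_first_usage_lines.2.1 pvWitness_find_first_usage_lines.2.2 := by
  constructor <;> decide

-- ===== VERDICT (by name: the statement is the Claim_ definition above) =====
theorem find_first_usage_lines_spec : Claim_equal_find_first_usage_lines := by
  intro lines imports from_imports _ hpre
  unfold Spec_find_first_usage_lines
  have hA : find_first_usage_lines lines imports from_imports
      = (PySem.List.sorted2 (pvItemsA lines imports from_imports)
          (fun x => x.2) (fun x => x.1.2) false).map (fun x => x.1.1) := by
    have h0 : find_first_usage_lines lines imports from_imports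
        = (PySem.List.sorted2
            (pvA_from lines from_imports (pvA_plain lines imports PySem.Dict.empty)).items
            (fun x => x.2) (fun x => x.1.2) false).map (fun x => x.1.1) := rfl
    rw [h0, pv_items_A lines imports from_imports hpre]
  have hB : find_first_usage_lines_alt lines imports from_imports
      = (PySem.List.sorted ((pvItemsA lines imports from_imports).map pvG)
          (fun t => t.2) false).map (fun t => t.1) := by
    have h0 : find_first_usage_lines_alt lines imports from_imports
        = (PySem.List.sorted ((pvB_entries imports from_imports).map (fun e =>
            (e.1, PySem.List.minD (e.2.filterMap (fun n =>
                ((pvB_pass lines 0 PySem.Dict.empty (PySem.List.dedup ((pvB_entries imports from_imports).flatMap (fun e => e.2)))).get? n).map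
                  (fun i => (i : WithTop Nat))))
              (fun v => v) (⊤ : WithTop Nat))))
            (fun t => t.2) false).map (fun t => t.1) := rfl
    rw [h0, pv_keyed_eq]
  rw [hA, hB]
  rw [pv_sorted2_eq_sorted _ _ _ (pv_pairwise lines imports from_imports hpre)]
  rw [pv_sorted_map pvG (fun t => t.2), List.map_map]
  rfl
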